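-- pv_equiv track=rewrite | github.com/yrider/Django_London_Underground_Journey_Planner | LondonUndergroundPlanner/backend_code/algorithms.py | change_line_info
-- ===== SOURCE A (Python) =====
-- def change_line_info(lines):
--     """
--     Function returns information for journey summary i.e when the user must change lines
--
--     :arg lines: lines list created from route_lines (list of all station lines visited)
--     :return: list of lines for each station that is passed through (instead of station)...
--         changes_index returns list of numbers where user must get of line and move to different one
--     """
--     # set initial variables for algorithm
--     first_line = lines[0]   # equal to the first line that is visited during the shortest route
--     interchanges = []   # list of specific numbers that explain when the user must change lines
--
--     # for number in the range of the length of the lines visited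
--     for num in range(len(lines)):
--         if lines[num] != first_line:
--             lines[num], first_line = first_line, lines[num]
--             interchanges.append(num)
--
--     # return the variables lines and interchanges
--     return lines, interchanges
-- ===== SOURCE B (Python) =====
-- def change_line_info(lines):
--     # Adjacent-difference scan for the change indices, then an in-place right shift
--     # (mutates `lines` in place, like the original).
--     interchanges = [i for i in range(1, len(lines)) if lines[i] != lines[i - 1]]
--     lines[1:] = lines[:-1]
--     return lines, interchanges
-- ===== Notes on version B (the rewrite author's own statement) =====
-- stated objective: simpler
-- what changed: Replaces the stateful accumulator-swap loop by a direct adjacent-difference scan over the original list plus one explicit right-shift slice assignment.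
-- crash fix: On the empty list A raises IndexError (it reads lines[0]); B returns ([], []). — e.g. on change_line_info([]): A raises IndexError, B returns ([], [])
import Mathlib
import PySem

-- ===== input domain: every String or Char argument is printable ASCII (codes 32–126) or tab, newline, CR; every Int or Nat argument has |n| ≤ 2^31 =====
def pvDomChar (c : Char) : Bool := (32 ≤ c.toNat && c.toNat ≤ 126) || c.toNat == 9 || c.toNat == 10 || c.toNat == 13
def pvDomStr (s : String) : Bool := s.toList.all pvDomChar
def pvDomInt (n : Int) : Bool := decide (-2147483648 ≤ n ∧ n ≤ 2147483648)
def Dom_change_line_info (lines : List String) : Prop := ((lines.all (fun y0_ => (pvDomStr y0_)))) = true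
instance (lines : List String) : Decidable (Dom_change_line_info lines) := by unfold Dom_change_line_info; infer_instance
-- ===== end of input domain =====

-- B replaces A's accumulator-swap loop by an adjacent-difference scan plus a right-shift
-- slice (objective: simpler). Both Pythons mutate `lines` in place; only the return value
-- is proved equal here. A raises IndexError on [], excluded by Pre_ (B returns ([], []) there).


-- ===== PORT A =====
-- the loop body: if lines[num] != first_line: swap and append num
def changeLineStep (st : List String × String × List Int) (num : Int) :
    List String × String × List Int :=
  match PySem.List.pyGet? st.1 num with
  | some v =>
      if v ≠ st.2.1 then (st.1.set num.toNat st.2.1, v, st.2.2 ++ [num]) else st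
      -- num ≥ 0 throughout (it ranges over range(len(lines))), so .set num.toNat is exact
  | none => st

def change_line_info (lines : List String) : List String × List Int :=
  match PySem.List.pyGet? lines 0 with   -- first_line = lines[0]; none = IndexError, outside Pre_
  | none => ([], [])
  | some first0 =>
      let st := (PySem.List.pyRange 0 (lines.length : Int) 1).foldl
        changeLineStep (lines, first0, [])
      (st.1, st.2.2)

-- ===== PORT B =====
def change_line_info_alt (lines : List String) : List String × List Int :=
  let interchanges := (PySem.List.pyRange 1 (lines.length : Int) 1).filter
    (fun i => decide (PySem.List.pyGet? lines i ≠ PySem.List.pyGet? lines (i - 1)))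
  -- lines[1:] = lines[:-1]; the resulting list is lines[:1] ++ lines[:-1]
  (PySem.List.slice lines none (some 1) ++ PySem.List.slice lines none (some (-1)),
   interchanges)

-- ===== PRECONDITION & SPEC =====
-- Pre_ excludes only the empty list, on which A's read of lines[0] raises IndexError.
def Pre_change_line_info (lines : List String) : Prop := lines ≠ []
instance (lines : List String) : Decidable (Pre_change_line_info lines) := by
  unfold Pre_change_line_info; infer_instance

def pvWitness_change_line_info : List String := ["Victoria", "Victoria", "Central"]

-- On the empty list A raises IndexError (it reads lines[0]); B returns ([], []).
def Raises_change_line_info (lines : List String) : Prop := lines = []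
instance (lines : List String) : Decidable (Raises_change_line_info lines) := by
  unfold Raises_change_line_info; infer_instance
def pvRaiseWitness_change_line_info : List String := []
def pvRaiseWitnessOut_change_line_info : List String × List Int := ([], [])

def Spec_change_line_info (lines : List String) (out : List String × List Int) : Prop :=
  out = change_line_info_alt lines
instance (lines : List String) (out : List String × List Int) :
    Decidable (Spec_change_line_info lines out) := by unfold Spec_change_line_info; infer_instance

-- ===== CLAIM (what is proved, stated in full; the proofs are below) =====
def Claim_equal_change_line_info : Prop :=
  ∀ (lines : List String), Dom_change_line_info lines → Pre_change_line_info lines →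
    Spec_change_line_info lines (change_line_info lines)

def Claim_raises_change_line_info : Prop :=
  (∀ (lines : List String), Dom_change_line_info lines → Raises_change_line_info lines →
      ¬ Pre_change_line_info lines) ∧
  (Dom_change_line_info (pvRaiseWitness_change_line_info) ∧
   Raises_change_line_info (pvRaiseWitness_change_line_info) ∧
   change_line_info_alt (pvRaiseWitness_change_line_info) = pvRaiseWitnessOut_change_line_info)

-- ===== LEMMAS AND PROOFS =====

-- the right-shifted list: lines[:1] ++ lines[:-1], A's loop's fixed point for its list state
def pvShift (l : List String) : List String := l.take 1 ++ l.dropLast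

-- loop state after A has processed indices [0, k): list = first k cells shifted,
-- first_line = original l[k-1], interchanges = change indices below k
def pvLs (l : List String) (k : Nat) : List String :=
  (pvShift l).take k ++ l.drop k

def pvInter (l : List String) (k : Nat) : List Int :=
  (PySem.List.pyRange 1 (k : Int) 1).filter
    (fun i => decide (PySem.List.pyGet? l i ≠ PySem.List.pyGet? l (i - 1)))

lemma pvShift_length (l : List String) (hl : l ≠ []) : (pvShift l).length = l.length := by
  have : 1 ≤ l.length := List.length_pos_of_ne_nil hl
  simp [pvShift]; omega

lemma pvLs_get (l : List String) (hl : l ≠ []) (k : Nat) (hk : k < l.length) :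
    (pvLs l k)[k]? = l[k]? := by
  have hlen : ((pvShift l).take k).length = k := by
    rw [List.length_take, pvShift_length l hl]; omega
  rw [pvLs, List.getElem?_append_right (le_of_eq hlen), hlen, Nat.sub_self,
    List.getElem?_drop, Nat.add_zero]

lemma pvShift_get (l : List String) (hl : l ≠ []) (k : Nat) (h1 : 1 ≤ k) (hk : k < l.length) :
    (pvShift l)[k]? = l[k - 1]? := by
  have h0 : 0 < l.length := List.length_pos_of_ne_nil hl
  rw [pvShift, List.getElem?_append_right (by simp [List.length_take]; omega)]
  have : k - (l.take 1).length = k - 1 := by simp [List.length_take]; omega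
  rw [this, List.getElem?_dropLast]
  have hk1 : k - 1 < l.length - 1 := by omega
  simp [hk1, List.getElem?_eq_getElem (by omega : k - 1 < l.length)]

lemma pvLs_succ (l : List String) (hl : l ≠ []) (k : Nat) (h1 : 1 ≤ k) (hk : k < l.length) :
    pvLs l (k + 1) = (pvLs l k).set k (l.getD (k - 1) "") := by
  apply List.ext_getElem?
  intro i
  have hsl : (pvShift l).length = l.length := pvShift_length l hl
  by_cases hik : i = k
  · subst hik
    rw [List.getElem?_set_self' ]
    rw [pvLs_get l hl i hk]
    have hlen : ((pvShift l).take (i+1)).length = i + 1 := by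
      rw [List.length_take, hsl]; omega
    rw [pvLs, List.getElem?_append_left (by omega), List.getElem?_take_of_lt (by omega),
      pvShift_get l hl i h1 hk]
    simp [List.getElem?_eq_getElem hk, List.getD_eq_getElem?_getD,
      List.getElem?_eq_getElem (show i - 1 < l.length by omega)]
  · rw [List.getElem?_set_ne (by omega)]
    by_cases hi : i < k
    · rw [pvLs, pvLs, List.getElem?_append_left (by rw [List.length_take, hsl]; omega),
        List.getElem?_append_left (by rw [List.length_take, hsl]; omega),
        List.getElem?_take_of_lt (by omega), List.getElem?_take_of_lt (by omega)]
    · have hgt : k + 1 ≤ i := by omega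
      rw [pvLs, pvLs,
        List.getElem?_append_right (by rw [List.length_take, hsl]; omega),
        List.getElem?_append_right (by rw [List.length_take, hsl]; omega),
        List.length_take, List.length_take, hsl,
        min_eq_left (by omega : k + 1 ≤ l.length), min_eq_left (by omega : k ≤ l.length)]
      rw [List.getElem?_drop, List.getElem?_drop]
      congr 1; omega

lemma pvLs_succ_eq (l : List String) (hl : l ≠ []) (k : Nat) (h1 : 1 ≤ k) (hk : k < l.length)
    (heq : l.getD k "" = l.getD (k - 1) "") : pvLs l (k + 1) = pvLs l k := by
  rw [pvLs_succ l hl k h1 hk]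
  apply List.ext_getElem?
  intro i
  by_cases hik : i = k
  · subst hik
    rw [List.getElem?_set_self', pvLs_get l hl i hk,
      List.getElem?_eq_getElem hk]
    have : l[i] = l.getD (i - 1) "" := by
      rw [← heq]; simp [List.getD_eq_getElem?_getD, List.getElem?_eq_getElem hk]
    simp [this]
  · rw [List.getElem?_set_ne (fun h => hik h.symm)]

lemma pvInter_succ (l : List String) (k : Nat) (h1 : 1 ≤ k) :
    pvInter l (k + 1) = pvInter l k ++
      (if l[k]? ≠ l[k - 1]? then [(k : Int)] else []) := by
  rw [pvInter, pvInter]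
  rw [show (((k + 1 : Nat)) : Int) = (k : Int) + 1 by push_cast; ring,
    PySem.List.pyRange_one_succ_right (by exact_mod_cast h1), List.filter_append]
  congr 1
  have : ((k : Int) - 1) = ((k - 1 : Nat) : Int) := by omega
  simp only [List.filter, this, PySem.List.pyGet?_natCast]
  split_ifs with h <;> simp_all

-- one step of A's loop from the invariant state
lemma step_inv (l : List String) (hl : l ≠ []) (k : Nat) (h1 : 1 ≤ k) (hk : k < l.length) :
    changeLineStep (pvLs l k, l.getD (k - 1) "", pvInter l k) (k : Int)
      = (pvLs l (k + 1), l.getD k "", pvInter l (k + 1)) := by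
  have hget : PySem.List.pyGet? (pvLs l k) (k : Int) = some (l.getD k "") := by
    rw [PySem.List.pyGet?_natCast, pvLs_get l hl k hk]
    simp [List.getD_eq_getElem?_getD, List.getElem?_eq_getElem hk]
  rw [changeLineStep, hget]
  simp only
  have hgetl : l[k]? = some (l.getD k "") := by
    simp [List.getD_eq_getElem?_getD, List.getElem?_eq_getElem hk]
  have hgetl1 : l[k - 1]? = some (l.getD (k - 1) "") := by
    simp [List.getD_eq_getElem?_getD, List.getElem?_eq_getElem (show k - 1 < l.length by omega)]
  have hiff : (l[k]? ≠ l[k - 1]?) ↔ (l.getD k "" ≠ l.getD (k - 1) "") := by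
    rw [hgetl, hgetl1]; simp
  by_cases hne : l.getD k "" = l.getD (k - 1) ""
  · rw [if_neg (not_not_intro hne)]
    rw [pvLs_succ_eq l hl k h1 hk hne, pvInter_succ l k h1,
      if_neg (by rw [hiff]; exact not_not_intro hne)]
    rw [hne, List.append_nil]
  · rw [if_pos hne]
    rw [pvInter_succ l k h1, if_pos (hiff.2 hne), Int.toNat_natCast,
      ← pvLs_succ l hl k h1 hk]

-- the loop invariant, from index k to the end
lemma loop_inv (l : List String) (hl : l ≠ []) (k : Nat) (h1 : 1 ≤ k) (hk : k ≤ l.length) :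
    (PySem.List.pyRange (k : Int) (l.length : Int) 1).foldl changeLineStep
        (pvLs l k, l.getD (k - 1) "", pvInter l k)
      = (pvLs l l.length, l.getD (l.length - 1) "", pvInter l l.length) := by
  induction hd : l.length - k generalizing k with
  | zero =>
      have hkl : k = l.length := by omega
      subst hkl
      rw [PySem.List.pyRange_one_eq_nil (le_refl _)]
      simp
  | succ d ih =>
      have hk' : k < l.length := by omega
      rw [PySem.List.pyRange_one_cons (by exact_mod_cast hk')]
      rw [List.foldl_cons, step_inv l hl k h1 hk']
      have : ((k : Int) + 1) = ((k + 1 : Nat) : Int) := by push_cast; ring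
      rw [this]
      have := ih (k + 1) (by omega) (by omega) (by omega)
      simpa using this

lemma pvLs_one (l : List String) (hl : l ≠ []) : pvLs l 1 = l := by
  rcases l with _ | ⟨h, t⟩
  · simp at hl
  · simp [pvLs, pvShift]

lemma pvLs_full (l : List String) (hl : l ≠ []) : pvLs l l.length = pvShift l := by
  rw [pvLs, List.drop_length, List.take_of_length_le (le_of_eq (pvShift_length l hl)),
    List.append_nil]

lemma pvInter_one (l : List String) : pvInter l 1 = [] := by
  rw [pvInter, PySem.List.pyRange_one_eq_nil (by norm_num)]; rfl

-- ===== VERDICT (by name: the statement is the Claim_ definition above) =====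
theorem change_line_info_spec : Claim_equal_change_line_info := by
  intro lines _ hpre
  unfold Spec_change_line_info
  rcases hl : lines with _ | ⟨h0, t⟩
  · exact absurd hl hpre
  subst hl
  set l := h0 :: t with hldef
  have hl : l ≠ [] := by simp [hldef]
  have hlen : 1 ≤ l.length := List.length_pos_of_ne_nil hl
  rw [change_line_info]
  have hget0 : PySem.List.pyGet? l 0 = some h0 := by
    simp [hldef, PySem.List.pyGet?, PySem.List.pyIdx?]
  rw [hget0]
  simp only
  -- peel the first loop iteration (num = 0): lines[0] == first_line, state unchanged
  rw [show (0 : Int) = ((0 : Nat) : Int) by rfl,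
    PySem.List.pyRange_one_cons (by exact_mod_cast hlen), List.foldl_cons]
  have hstep0 : changeLineStep (l, h0, []) ((0 : Nat) : Int) = (l, h0, []) := by
    rw [changeLineStep, show PySem.List.pyGet? l ((0:Nat):Int) = some h0 from hget0]
    simp
  rw [hstep0]
  have hinit : (l, h0, ([] : List Int))
      = (pvLs l 1, l.getD (1 - 1) "", pvInter l 1) := by
    rw [pvLs_one l hl, pvInter_one l]
    simp [hldef]
  rw [show ((0:Nat):Int) + 1 = ((1:Nat):Int) by rfl, hinit,
    loop_inv l hl 1 (le_refl _) hlen]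
  rw [change_line_info_alt]
  simp only [PySem.List.slice_to_neg_one]
  rw [pvLs_full l hl, pvShift, PySem.List.slice_to l (by norm_num : (0:Int) ≤ 1), pvInter]
  norm_num

theorem change_line_info_raises : Claim_raises_change_line_info := by
  unfold Claim_raises_change_line_info
  exact ⟨fun lines _ hr hp => hp hr, by decide⟩

-- self-check: the raise witness satisfies Raises_ and B's port returns the stated value there
theorem pvRaiseWitness_ok :
    Raises_change_line_info pvRaiseWitness_change_line_info ∧
      change_line_info_alt pvRaiseWitness_change_line_info = pvRaiseWitnessOut_change_line_info :=
  change_line_info_raises.2.2
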